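-- pv_equiv track=rewrite | github.com/ainfosec/pretty_j1587 | struct_from_J1587.py | get_bytecount_from_pid
-- ===== SOURCE A (Python) =====
-- def get_bytecount_from_pid(pid):
--   """
--      The pid is the calculated value, which could be composed of several
--      bytes when using page extensions.
--      Return the number of bytes the pid utilizes. 3 for n. -1 for unknown
--   """
--   bytes1 = [(0,127),(256,383),(512,639),(768,895)]
--   bytes2 = [(128,191),(384,447),(640,703),(896,959)]
--   bytesn = [(192,253),(448,509),(704,765),(960,1021)]
--   # 254 is proprietary data. I will put it under "variable" len, as it is not
--   #  addressed in the spec, but we had it in our captures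
--   bytesn.append((254,254))
--   for rng in bytes1:
--     if pid in range(rng[0],rng[1]+1): return 1
--   for rng in bytes2:
--     if pid in range(rng[0],rng[1]+1): return 2
--   for rng in bytesn:
--     if pid in range(rng[0],rng[1]+1): return 3
--   return -1
-- ===== SOURCE B (Python) =====
-- def get_bytecount_from_pid(pid):
--     if pid == 254:
--         return 3
--     if 0 <= pid <= 1021:
--         if pid % 256 <= 127:
--             return 1
--         if pid % 256 <= 191:
--             return 2
--         if pid % 256 <= 253:
--             return 3
--     return -1
-- ===== Notes on version B (the rewrite author's own statement) =====
-- stated objective: simpler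
-- what changed: Replaced the three lists of (lo,hi) ranges scanned with `pid in range(...)` membership tests by a closed-form arithmetic test: the range groups repeat with a fixed period, so one bounds check plus thresholds on the pid remainder modulo that period (with the proprietary pid special-cased) gives the byte count.
import Mathlib
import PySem

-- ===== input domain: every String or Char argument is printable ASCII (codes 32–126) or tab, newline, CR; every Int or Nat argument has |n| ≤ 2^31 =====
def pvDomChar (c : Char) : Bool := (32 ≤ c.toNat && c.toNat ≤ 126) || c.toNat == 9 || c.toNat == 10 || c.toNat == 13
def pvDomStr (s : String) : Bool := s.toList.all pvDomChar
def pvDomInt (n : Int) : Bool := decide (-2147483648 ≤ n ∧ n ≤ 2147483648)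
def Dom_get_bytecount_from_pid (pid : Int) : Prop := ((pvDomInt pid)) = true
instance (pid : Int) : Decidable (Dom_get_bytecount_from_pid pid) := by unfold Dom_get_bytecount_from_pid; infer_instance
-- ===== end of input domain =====

-- B replaces A's scan of three literal range lists by a closed-form bounds-plus-modulo test (objective: simpler); equivalence proved on all Int inputs in Dom.
-- ===== PORT A =====
-- Literal port of A: three literal range-pair lists scanned in order; `pid in range(a,b+1)` is a ≤ pid ∧ pid ≤ b.
def pvBytes1 : List (Int × Int) := [(0,127),(256,383),(512,639),(768,895)]
def pvBytes2 : List (Int × Int) := [(128,191),(384,447),(640,703),(896,959)]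
def pvBytesn : List (Int × Int) := [(192,253),(448,509),(704,765),(960,1021)] ++ [(254,254)]
def pvScan (pid : Int) (rngs : List (Int × Int)) : Bool :=
  rngs.any (fun rng => decide (rng.1 ≤ pid ∧ pid ≤ rng.2))
def get_bytecount_from_pid (pid : Int) : Int :=
  if pvScan pid pvBytes1 then 1
  else if pvScan pid pvBytes2 then 2
  else if pvScan pid pvBytesn then 3
  else -1

-- ===== PORT B =====
-- Port of B: special-case 254, then one bounds check and thresholds on pid % 256 (PySem.Int.mod = Python %).
def get_bytecount_from_pid_alt (pid : Int) : Int :=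
  if pid == 254 then 3
  else if 0 ≤ pid ∧ pid ≤ 1021 then
    if PySem.Int.mod pid 256 ≤ 127 then 1
    else if PySem.Int.mod pid 256 ≤ 191 then 2
    else if PySem.Int.mod pid 256 ≤ 253 then 3
    else -1
  else -1

-- ===== PRECONDITION & SPEC =====
def Spec_get_bytecount_from_pid (pid : Int) (out : Int) : Prop := out = get_bytecount_from_pid_alt pid
instance (pid : Int) (out : Int) : Decidable (Spec_get_bytecount_from_pid pid out) := by unfold Spec_get_bytecount_from_pid; infer_instance

-- ===== CLAIM (what is proved, stated in full; the proofs are below) =====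
def Claim_equal_get_bytecount_from_pid : Prop := ∀ (pid : Int), Dom_get_bytecount_from_pid pid → Spec_get_bytecount_from_pid pid (get_bytecount_from_pid pid)

-- ===== LEMMAS AND PROOFS =====

-- ===== VERDICT (by name: the statement is the Claim_ definition above) =====
theorem get_bytecount_from_pid_spec : Claim_equal_get_bytecount_from_pid := by
  intro pid _
  unfold Spec_get_bytecount_from_pid get_bytecount_from_pid get_bytecount_from_pid_alt
  have hm : PySem.Int.mod pid 256 = pid % 256 := PySem.Int.mod_eq_emod_of_pos (by omega)
  obtain ⟨q, r, hpid, hr0, hr256, hr⟩ : ∃ q r : Int, pid = 256 * q + r ∧ 0 ≤ r ∧ r < 256 ∧ pid % 256 = r :=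
    ⟨pid / 256, pid % 256, by omega, by omega, by omega, rfl⟩
  rw [hm, hr]
  simp [pvScan, pvBytes1, pvBytes2, pvBytesn]
  split_ifs <;> omega
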